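-- pv_equiv track=rewrite | github.com/fahrulpens/DartCode-Metrics-Extractor | src/dart_metrics/metrics/methods.py | _prev_ident
-- ===== SOURCE A (Python) =====
-- from typing import Optional
--
-- def _prev_ident(s: str, start_idx: int) -> Optional[str]:
--     """Return identifier immediately preceding '(' that starts at start_idx."""
--     i = start_idx - 1
--     # skip spaces/newlines
--     while i >= 0 and s[i].isspace():
--         i -= 1
--     # read identifier backwards
--     j = i
--     while j >= 0 and (s[j].isalnum() or s[j] == "_"):
--         j -= 1
--     ident = s[j+1:i+1]
--     return ident if ident else None
-- ===== SOURCE B (Python) =====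
-- from typing import Optional
--
-- def _prev_ident(s: str, start_idx: int) -> Optional[str]:
--     """Return identifier immediately preceding '(' that starts at start_idx."""
--     if start_idx <= 0:
--         return None  # nothing precedes a position at (or before) the start
--     # reverse the prefix, strip the (now leading) whitespace, then collect
--     # identifier characters forwards, rebuilding the identifier by prepending
--     rev = s[:start_idx][::-1].lstrip()
--     ident = ""
--     for c in rev:
--         if not (c.isalnum() or c == "_"):
--             break
--         ident = c + ident
--     return ident or None
-- ===== Notes on version B (the rewrite author's own statement) =====
-- stated objective: idiomatic
-- what changed: Replaces A's two backward index-scanning while loops and slice arithmetic with reverse-the-prefix + lstrip for the whitespace step and a single forward collect-until-non-word-character pass that rebuilds the identifier by prepending.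
import Mathlib
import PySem

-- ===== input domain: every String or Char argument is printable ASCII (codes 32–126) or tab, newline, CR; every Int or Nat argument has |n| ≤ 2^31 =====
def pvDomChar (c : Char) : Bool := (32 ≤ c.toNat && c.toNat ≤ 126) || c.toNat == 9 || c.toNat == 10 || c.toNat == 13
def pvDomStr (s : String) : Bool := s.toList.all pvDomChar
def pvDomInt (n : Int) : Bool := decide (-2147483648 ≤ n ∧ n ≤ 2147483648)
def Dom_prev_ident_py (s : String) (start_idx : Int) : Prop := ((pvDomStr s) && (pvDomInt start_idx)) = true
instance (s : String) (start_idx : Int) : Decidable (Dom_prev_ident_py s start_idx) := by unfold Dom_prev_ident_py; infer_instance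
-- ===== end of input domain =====

-- B replaces A's two backward index-scan loops with reverse + lstrip + a forward
-- collect-until-non-word pass (idiomatic, same cost); equivalence proved for
-- start_idx ≤ len(s) (beyond that A raises IndexError).


-- ===== PORT A =====
-- while i >= 0 and s[i].isspace(): i -= 1     (pyGet? = none is Python's
-- IndexError, excluded by Pre_; the port stops there)
def pvA_skip (s : List Char) (i : Int) : Int :=
  if 0 ≤ i then
    match PySem.List.pyGet? s i with
    | some c => if PySem.Chars.isspace c then pvA_skip s (i - 1) else i
    | none => i
  else i
termination_by (i + 1).toNat
decreasing_by omega

-- while j >= 0 and (s[j].isalnum() or s[j] == "_"): j -= 1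
def pvA_read (s : List Char) (j : Int) : Int :=
  if 0 ≤ j then
    match PySem.List.pyGet? s j with
    | some c => if PySem.Chars.isalnum c || c == '_' then pvA_read s (j - 1) else j
    | none => j
  else j
termination_by (j + 1).toNat
decreasing_by omega

def prev_ident_py (s : String) (start_idx : Int) : Option String :=
  let i := pvA_skip s.toList (start_idx - 1)
  let j := pvA_read s.toList i
  let ident := PySem.List.slice s.toList (some (j + 1)) (some (i + 1))
  if ident.isEmpty then none else some (String.ofList ident)

-- ===== PORT B =====
-- for c in rev: if not (c.isalnum() or c == "_"): break; ident = c + ident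
def pvB_collect (rev : List Char) (ident : List Char) : List Char :=
  match rev with
  | [] => ident
  | c :: rest =>
      if PySem.Chars.isalnum c || c == '_' then pvB_collect rest (c :: ident) else ident

def prev_ident_py_alt (s : String) (start_idx : Int) : Option String :=
  if start_idx ≤ 0 then none  -- nothing precedes a position at (or before) the start
  else
    -- s[:start_idx][::-1].lstrip()   ([::-1] is reverse: PySem.List.slice?_none_none_neg_one)
    let rev := PySem.Chars.lstrip (PySem.List.slice s.toList none (some start_idx)).reverse
    let ident := pvB_collect rev []
    if ident.isEmpty then none else some (String.ofList ident)

-- ===== PRECONDITION & SPEC =====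
-- Pre_ excludes exactly start_idx > len(s), where A raises IndexError.
def Pre_prev_ident_py (s : String) (start_idx : Int) : Prop :=
  start_idx ≤ (s.toList.length : Int)
instance (s : String) (start_idx : Int) : Decidable (Pre_prev_ident_py s start_idx) := by
  unfold Pre_prev_ident_py; infer_instance

def pvWitness_prev_ident_py : String × Int := ("foo (", 4)

def Spec_prev_ident_py (s : String) (start_idx : Int) (out : Option String) : Prop :=
  out = prev_ident_py_alt s start_idx
instance (s : String) (start_idx : Int) (out : Option String) : Decidable (Spec_prev_ident_py s start_idx out) := by
  unfold Spec_prev_ident_py; infer_instance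

-- ===== CLAIM (what is proved, stated in full; the proofs are below) =====
def Claim_equal_prev_ident_py : Prop := ∀ (s : String) (start_idx : Int), Dom_prev_ident_py s start_idx → Pre_prev_ident_py s start_idx → Spec_prev_ident_py s start_idx (prev_ident_py s start_idx)


-- ===== LEMMAS AND PROOFS =====

-- word-character predicate shared by both reasonings
def pvWordB (c : Char) : Bool := PySem.Chars.isalnum c || c == '_'

theorem pvA_read_le (l : List Char) (j : Int) : pvA_read l j ≤ j := by
  by_cases h : 0 ≤ j
  · rw [pvA_read, if_pos h]
    cases hg : PySem.List.pyGet? l j with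
    | none => exact le_refl j
    | some c =>
        dsimp only
        cases hw : (PySem.Chars.isalnum c || c == '_') with
        | true =>
            rw [if_pos rfl]
            have := pvA_read_le l (j - 1)
            omega
        | false => rw [if_neg Bool.false_ne_true]
  · rw [pvA_read]; simp [h]
termination_by (j + 1).toNat
decreasing_by omega

theorem pvA_read_ge (l : List Char) (j : Int) (h : -1 ≤ j) : -1 ≤ pvA_read l j := by
  by_cases h0 : 0 ≤ j
  · rw [pvA_read, if_pos h0]
    cases hg : PySem.List.pyGet? l j with
    | none => omega
    | some c =>
        dsimp only
        cases hw : (PySem.Chars.isalnum c || c == '_') with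
        | true =>
            rw [if_pos rfl]
            exact pvA_read_ge l (j - 1) (by omega)
        | false =>
            rw [if_neg Bool.false_ne_true]
            omega
  · rw [pvA_read]; simp [h0]; omega
termination_by (j + 1).toNat
decreasing_by omega

theorem pvB_collect_eq (rev acc : List Char) :
    pvB_collect rev acc = (rev.takeWhile pvWordB).reverse ++ acc := by
  induction rev generalizing acc with
  | nil => simp [pvB_collect]
  | cons c rest ih =>
      cases hw : (PySem.Chars.isalnum c || c == '_') with
      | true => simp [pvB_collect, hw, List.takeWhile_cons, pvWordB, ih]
      | false => simp [pvB_collect, hw, List.takeWhile_cons, pvWordB]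

-- extending a nonneg-bounds slice by one element on the right
theorem pv_slice_extend (l : List Char) (a n : Nat) (ha : a ≤ n) (hn : n < l.length) :
    PySem.List.slice l (some (a : Int)) (some ((n : Int) + 1)) =
      PySem.List.slice l (some (a : Int)) (some (n : Int)) ++ [l[n]] := by
  have h1 : ((n : Int) + 1) = ((n + 1 : Nat) : Int) := by push_cast; ring
  rw [h1, PySem.List.slice_natCast, PySem.List.slice_natCast]
  have h2 : n + 1 - a = (n - a) + 1 := by omega
  rw [h2, List.take_succ]
  congr 1
  rw [List.getElem?_drop]
  have h3 : a + (n - a) = n := by omega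
  rw [h3, List.getElem?_eq_getElem hn]
  rfl

-- READ phase: the backward identifier scan produces (as a slice) exactly the
-- reversed takeWhile of the reversed prefix of length n
theorem pv_read_eq (l : List Char) (n : Nat) (hn : n ≤ l.length) :
    PySem.List.slice l (some (pvA_read l ((n : Int) - 1) + 1)) (some (n : Int)) =
      ((l.take n).reverse.takeWhile pvWordB).reverse := by
  induction n with
  | zero =>
      have h1 : ((0 : Nat) : Int) - 1 = -1 := by norm_num
      rw [h1, pvA_read]
      norm_num
      rw [show (0 : Int) = ((0 : Nat) : Int) from rfl, PySem.List.slice_to_natCast]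
      simp
  | succ n ih =>
      have hn' : n < l.length := by omega
      have hi : ((n + 1 : Nat) : Int) - 1 = (n : Int) := by push_cast; ring
      rw [hi]
      have hget : PySem.List.pyGet? l (n : Int) = some l[n] :=
        PySem.List.pyGet?_ofNat l n hn'
      have htake : l.take (n + 1) = l.take n ++ [l[n]] := by
        rw [List.take_succ, List.getElem?_eq_getElem hn']; rfl
      rw [pvA_read]
      simp only [if_pos (by positivity : (0:Int) ≤ (n : Int)), hget]
      cases hw : (PySem.Chars.isalnum l[n] || l[n] == '_') with
      | true =>
        rw [if_pos rfl]
        have hle := pvA_read_le l ((n : Int) - 1)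
        have hge := pvA_read_ge l ((n : Int) - 1) (by omega)
        set r := pvA_read l ((n : Int) - 1) with hr
        have hcast : r + 1 = (((r + 1).toNat : Nat) : Int) := by omega
        have hnp1 : ((n + 1 : Nat) : Int) = (n : Int) + 1 := by push_cast; ring
        have hstep : PySem.List.slice l (some (r + 1)) (some ((n : Int) + 1)) =
            PySem.List.slice l (some (r + 1)) (some (n : Int)) ++ [l[n]] := by
          rw [hcast]
          exact pv_slice_extend l (r + 1).toNat n (by omega) hn'
        rw [hnp1, hstep, ih (by omega), htake]
        simp only [List.reverse_append, List.reverse_cons, List.reverse_nil,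
          List.nil_append, List.singleton_append]
        rw [List.takeWhile_cons_of_pos (by simp [pvWordB, hw])]
        simp
      | false =>
        rw [if_neg Bool.false_ne_true]
        have hnp1 : ((n + 1 : Nat) : Int) = (n : Int) + 1 := by push_cast; ring
        have hempty : PySem.List.slice l (some ((n : Int) + 1)) (some ((n : Int) + 1)) = [] := by
          have h1 : ((n : Int) + 1) = ((n + 1 : Nat) : Int) := by push_cast; ring
          rw [h1, PySem.List.slice_natCast]
          simp
        rw [hnp1, hempty, htake]
        simp only [List.reverse_append, List.reverse_cons, List.reverse_nil,
          List.nil_append, List.singleton_append]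
        rw [List.takeWhile_cons_of_neg (by simp [pvWordB, hw])]
        simp

-- SKIP + READ: A's full pipeline on the prefix of length n equals B's
theorem pv_main_eq (l : List Char) (n : Nat) (hn : n ≤ l.length) :
    PySem.List.slice l
        (some (pvA_read l (pvA_skip l ((n : Int) - 1)) + 1))
        (some (pvA_skip l ((n : Int) - 1) + 1)) =
      (((l.take n).reverse.dropWhile PySem.Chars.isspace).takeWhile pvWordB).reverse := by
  induction n with
  | zero =>
      have h1 : ((0 : Nat) : Int) - 1 = -1 := by norm_num
      rw [h1, pvA_skip]
      rw [if_neg (by norm_num)]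
      rw [pvA_read]
      rw [if_neg (by norm_num)]
      norm_num
      rw [show (0 : Int) = ((0 : Nat) : Int) from rfl, PySem.List.slice_to_natCast]
      simp
  | succ n ih =>
      have hn' : n < l.length := by omega
      have hi : ((n + 1 : Nat) : Int) - 1 = (n : Int) := by push_cast; ring
      rw [hi]
      have hget : PySem.List.pyGet? l (n : Int) = some l[n] :=
        PySem.List.pyGet?_ofNat l n hn'
      have htake : l.take (n + 1) = l.take n ++ [l[n]] := by
        rw [List.take_succ, List.getElem?_eq_getElem hn']; rfl
      rw [pvA_skip]
      simp only [if_pos (by positivity : (0:Int) ≤ (n : Int)), hget]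
      cases hs : PySem.Chars.isspace l[n] with
      | true =>
          rw [if_pos rfl]
          rw [ih (by omega), htake]
          simp only [List.reverse_append, List.reverse_cons, List.reverse_nil,
            List.nil_append, List.singleton_append]
          rw [List.dropWhile_cons_of_pos hs]
      | false =>
          rw [if_neg Bool.false_ne_true]
          have hnp1 : ((n : Int) + 1) = ((n + 1 : Nat) : Int) := by push_cast; ring
          have h2 := pv_read_eq l (n + 1) hn
          have h3 : ((n + 1 : Nat) : Int) - 1 = (n : Int) := by push_cast; ring
          rw [h3] at h2
          rw [hnp1, h2, htake]
          simp only [List.reverse_append, List.reverse_cons, List.reverse_nil,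
            List.nil_append, List.singleton_append]
          rw [List.dropWhile_cons_of_neg (by simp [hs])]

-- ===== VERDICT (by name: the statement is the Claim_ definition above) =====
theorem prev_ident_py_spec : Claim_equal_prev_ident_py := by
  intro s start_idx _hdom hle
  unfold Pre_prev_ident_py at hle
  unfold Spec_prev_ident_py
  simp only [prev_ident_py, prev_ident_py_alt]
  by_cases h0 : start_idx ≤ 0
  · -- A: both loops refuse a negative index; the slice s[j+1:i+1] is empty
    rw [if_pos h0]
    have hskip : pvA_skip s.toList (start_idx - 1) = start_idx - 1 := by
      rw [pvA_skip, if_neg (by omega)]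
    have hread : pvA_read s.toList (start_idx - 1) = start_idx - 1 := by
      rw [pvA_read, if_neg (by omega)]
    rw [hskip, hread]
    have hlen : (PySem.List.slice s.toList (some (start_idx - 1 + 1))
        (some (start_idx - 1 + 1))).length = 0 := by
      rw [PySem.List.length_slice]; omega
    rw [List.eq_nil_of_length_eq_zero hlen]
    rfl
  · rw [if_neg h0]
    have h0' : 0 ≤ start_idx := by omega
    have hn : start_idx = ((start_idx.toNat : Nat) : Int) := by omega
    have hnle : start_idx.toNat ≤ s.toList.length := by omega
    have hslice : PySem.List.slice s.toList none (some start_idx) = s.toList.take start_idx.toNat := by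
      rw [hn, PySem.List.slice_to_natCast, Int.toNat_natCast]
    have hmain := pv_main_eq s.toList start_idx.toNat hnle
    rw [← hn] at hmain
    have hl : PySem.Chars.lstrip = fun cs : List Char => cs.dropWhile PySem.Chars.isspace := rfl
    rw [hslice, pvB_collect_eq, hmain, hl]
    simp
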